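-- pv_equiv track=rewrite | github.com/dgoldman0/graphnumbers | reboot/canonical_graph.py | bitsets_to_matrix
-- ===== SOURCE A (Python) =====
-- def bitsets_to_matrix(adj):
--     """Convert bitsets to 0/1 adjacency matrix (list-of-lists)."""
--     n = len(adj)
--     M = [[0] * n for _ in range(n)]
--     for i in range(n):
--         b = adj[i]
--         for j in range(n):
--             M[i][j] = 1 if ((b >> j) & 1) else 0
--     return M
-- ===== SOURCE B (Python) =====
-- def _row(n, mask, b):
--     """Row for one bitset: pre-fill the row with the sign bit's value and walk
--     only the minority bits (set bits of b, or of ~b for negative b), clearing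
--     the lowest set bit each step."""
--     if b >= 0:
--         fill, m = 1, b & mask
--         row = [0] * n
--     else:
--         fill, m = 0, ~b & mask
--         row = [1] * n
--     while m:
--         t = m & (m - 1)                         # m with its lowest set bit cleared
--         row[(m - t).bit_length() - 1] = fill    # index of that lowest set bit
--         m = t
--     return row
--
-- def bitsets_to_matrix(adj):
--     n = len(adj)
--     mask = (1 << n) - 1
--     return [_row(n, mask, b) for b in adj]
-- ===== Notes on version B (the rewrite author's own statement) =====
-- stated objective: faster
-- what changed: Instead of testing all n bit positions of each bitset with a shift-and-mask per cell, B pre-fills each row with the bitset's sign bit and walks only the minority bits (the set bits of b, or of ~b when b is negative) by repeatedly clearing the lowest set bit, writing just those positions.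
import Mathlib
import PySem

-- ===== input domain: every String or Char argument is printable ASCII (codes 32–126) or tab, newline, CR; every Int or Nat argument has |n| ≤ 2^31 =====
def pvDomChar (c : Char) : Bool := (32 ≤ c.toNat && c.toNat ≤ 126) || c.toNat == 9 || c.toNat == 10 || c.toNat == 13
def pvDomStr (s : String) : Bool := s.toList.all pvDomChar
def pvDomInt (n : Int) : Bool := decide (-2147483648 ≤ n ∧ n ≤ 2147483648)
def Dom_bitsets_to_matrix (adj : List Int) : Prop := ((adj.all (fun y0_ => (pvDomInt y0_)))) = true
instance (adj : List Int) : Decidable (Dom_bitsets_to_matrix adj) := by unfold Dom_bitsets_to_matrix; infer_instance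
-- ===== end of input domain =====

-- ===== PORT A =====
-- A: for each i, test every bit position j of adj[i] with a shift-and-mask.
def bitsets_to_matrix (adj : List Int) : List (List Int) :=
  let n := adj.length
  let M := List.replicate n (List.replicate n (0 : Int))
  (PySem.List.pyRange 0 (n : Int) 1).foldl (fun M i =>
    let b := PySem.List.pyGetD adj i 0
    (PySem.List.pyRange 0 (n : Int) 1).foldl (fun M j =>
      PySem.List.pySetD M i (PySem.List.pySetD (PySem.List.pyGetD M i []) j
        (if PySem.Int.band (b >>> j.toNat) 1 ≠ 0 then 1 else 0))) M) M
  -- j.toNat is exact: j ranges over 0..n-1, so j ≥ 0 and Python's b >> j is Lean's b >>> j.toNat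

-- ===== PORT B =====
-- B (faster): pre-fill each row with the sign bit's value and write only the minority
-- bit positions, found by repeatedly clearing the lowest set bit of the masked bitset.
-- The while-loop value m is Python's nonnegative int (b & mask resp. ~b & mask), held as Nat.
def pvRowLoop (m : Nat) (fill : Int) (row : List Int) : List Int :=
  if _h : m = 0 then row
  else
    pvRowLoop (m &&& (m - 1)) fill
      (PySem.List.pySetD row
        ((PySem.Int.bitLength (((m - (m &&& (m - 1))) : Nat) : Int) - 1 : Nat) : Int) fill)
termination_by m
decreasing_by have : m &&& (m - 1) ≤ m - 1 := Nat.and_le_right; omega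

def pvRow (n : Nat) (mask : Int) (b : Int) : List Int :=
  if 0 ≤ b then pvRowLoop (PySem.Int.band b mask).toNat 1 (List.replicate n 0)
  else pvRowLoop (PySem.Int.band (Int.not b) mask).toNat 0 (List.replicate n 1)

def bitsets_to_matrix_alt (adj : List Int) : List (List Int) :=
  let n := adj.length
  let mask : Int := ((1 : Int) <<< n) - 1
  adj.map (fun b => pvRow n mask b)

-- ===== PRECONDITION & SPEC =====
def Spec_bitsets_to_matrix (adj : List Int) (out : List (List Int)) : Prop := out = bitsets_to_matrix_alt adj
instance (adj : List Int) (out : List (List Int)) : Decidable (Spec_bitsets_to_matrix adj out) := by unfold Spec_bitsets_to_matrix; infer_instance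

-- ===== CLAIM (what is proved, stated in full; the proofs are below) =====
def Claim_equal_bitsets_to_matrix : Prop := ∀ (adj : List Int), Dom_bitsets_to_matrix adj → Spec_bitsets_to_matrix adj (bitsets_to_matrix adj)

-- ===== LEMMAS AND PROOFS =====

-- the Int mask (1 << n) - 1 is the Nat mask 2^n - 1
lemma pv_mask_cast (n : Nat) : ((1 : Int) <<< n) - 1 = ((2 ^ n - 1 : Nat) : Int) := by
  have h1 : (1 : Nat) ≤ 2 ^ n := Nat.one_le_two_pow
  rw [Int.shiftLeft_eq]
  push_cast [h1]
  ring

-- one step of the lowest-set-bit walk: m &&& (m-1) clears exactly the lowest set bit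
lemma pv_step (m : Nat) (hm : m ≠ 0) :
    ∃ k, m.testBit k = true ∧
      (∀ j, (m &&& (m - 1)).testBit j = (decide (j ≠ k) && m.testBit j)) ∧
      m - (m &&& (m - 1)) = 2 ^ k := by
  induction m using Nat.strong_induction_on with
  | _ m ih =>
    rcases Nat.even_or_odd m with he | ho
    · -- even: recurse on m / 2
      obtain ⟨q, hq⟩ := he
      have hq2 : m = 2 * q := by omega
      have hqne : q ≠ 0 := by omega
      obtain ⟨k, hk, hch, hs⟩ := ih q (by omega) hqne
      have hm2 : (m - 1) / 2 = q - 1 := by omega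
      have hmd : m / 2 = q := by omega
      have hm0 : m % 2 = 0 := by omega
      have hclaim : m &&& (m - 1) = 2 * (q &&& (q - 1)) := by
        apply Nat.eq_of_testBit_eq
        intro i
        rw [Nat.testBit_land]
        cases i with
        | zero =>
          rw [Nat.testBit_zero, Nat.testBit_zero, Nat.testBit_zero]
          simp [hm0, Nat.mul_mod_right]
        | succ i =>
          rw [Nat.testBit_succ, Nat.testBit_succ, Nat.testBit_succ, hmd, hm2,
            Nat.mul_div_cancel_left _ (by omega : 0 < 2), ← Nat.testBit_land]
      refine ⟨k + 1, ?_, ?_, ?_⟩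
      · rw [Nat.testBit_succ, hmd]; exact hk
      · intro j
        rw [hclaim]
        cases j with
        | zero =>
          rw [Nat.testBit_zero, Nat.testBit_zero]
          simp [hm0, Nat.mul_mod_right]
        | succ j =>
          rw [Nat.testBit_succ, Nat.testBit_succ, hmd,
            Nat.mul_div_cancel_left _ (by omega : 0 < 2), hch j]
          have hd : (decide (j ≠ k)) = (decide (j + 1 ≠ k + 1)) := by simp
          rw [hd]
      · rw [hclaim]
        have hle : q &&& (q - 1) ≤ q - 1 := Nat.and_le_right
        have hp : 2 ^ (k + 1) = 2 * 2 ^ k := by ring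
        omega
    · -- odd: lowest set bit is bit 0 and m &&& (m-1) = m - 1
      have hm1 : m % 2 = 1 := Nat.odd_iff.mp ho
      have hmm : (m - 1) % 2 = 0 := by omega
      have hdd : (m - 1) / 2 = m / 2 := by omega
      have hclaim : m &&& (m - 1) = m - 1 := by
        apply Nat.eq_of_testBit_eq
        intro i
        rw [Nat.testBit_land]
        cases i with
        | zero =>
          rw [Nat.testBit_zero, Nat.testBit_zero]
          simp [hmm]
        | succ i =>
          rw [Nat.testBit_succ, Nat.testBit_succ, hdd, Bool.and_self]
      refine ⟨0, ?_, ?_, ?_⟩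
      · rw [Nat.testBit_zero]; simp [hm1]
      · intro j
        rw [hclaim]
        cases j with
        | zero => rw [Nat.testBit_zero]; simp [hmm]
        | succ j =>
          rw [Nat.testBit_succ, Nat.testBit_succ, hdd]
          simp
      · rw [hclaim]; simp; omega

-- Python's (2^k).bit_length() = k + 1
lemma pv_bitLength_pow (k : Nat) : PySem.Int.bitLength ((2 ^ k : Nat) : Int) = k + 1 := by
  induction k with
  | zero => decide
  | succ k ih =>
    rw [PySem.Int.bitLength_natCast (Nat.two_pow_pos (k + 1))]
    have hh : 2 ^ (k + 1) / 2 = 2 ^ k := by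
      have : 2 ^ (k + 1) = 2 * 2 ^ k := by ring
      omega
    rw [hh, ih]

-- the walk writes `fill` exactly at the set bits of m
lemma pv_loop_char (n : Nat) :
    ∀ (m : Nat) (fill : Int) (row : List Int), row.length = n → m < 2 ^ n →
      pvRowLoop m fill row
        = (List.range n).map (fun j => if m.testBit j then fill else row.getD j 0) := by
  intro m
  induction m using Nat.strong_induction_on with
  | _ m ih =>
    intro fill row hlen hm
    by_cases h0 : m = 0
    · subst h0
      rw [pvRowLoop, dif_pos rfl]
      apply List.ext_getElem
      · simp [hlen]
      · intro i hi hi2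
        simp only [List.getElem_map, List.getElem_range, Nat.zero_testBit, Bool.false_eq_true,
          if_false]
        rw [List.getD_eq_getElem _ _ (by omega : i < row.length)]
    · obtain ⟨k, hbk, hch, hsub⟩ := pv_step m h0
      have hkn : k < n := by
        have h1 : 2 ^ k ≤ m := Nat.ge_two_pow_of_testBit hbk
        have h2 : 2 ^ k < 2 ^ n := by omega
        exact (Nat.pow_lt_pow_iff_right (by omega : 1 < 2)).mp h2
      have htle : m &&& (m - 1) ≤ m - 1 := Nat.and_le_right
      rw [pvRowLoop, dif_neg h0, hsub, pv_bitLength_pow]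
      have hset : PySem.List.pySetD row ((k + 1 - 1 : Nat) : Int) fill = row.set k fill := by
        simp [pysem]
      rw [hset]
      rw [ih (m &&& (m - 1)) (by omega) fill (row.set k fill) (by simp [hlen]) (by omega)]
      apply List.map_congr_left
      intro j hj
      have hjn : j < n := List.mem_range.mp hj
      rw [hch j]
      by_cases hjk : j = k
      · subst hjk
        have h1 : (decide (j ≠ j) && m.testBit j) = false := by simp
        have hL : (row.set j fill).getD j 0 = fill := by
          rw [List.getD_eq_getElem _ _ (by simp [hlen]; omega), List.getElem_set_self]
        rw [h1, hL, if_neg (by simp), if_pos hbk]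
      · have h1 : (decide (j ≠ k) && m.testBit j) = m.testBit j := by simp [hjk]
        rw [h1]
        have hget : (row.set k fill).getD j 0 = row.getD j 0 := by
          by_cases hjr : j < row.length
          · rw [List.getD_eq_getElem _ _ (by simp [hlen]; omega),
              List.getD_eq_getElem _ _ hjr, List.getElem_set_ne (by omega)]
          · omega
        rw [hget]

-- generic: folding index-wise `set` over range' a k rewrites the suffix to the map of w,
-- provided the body acts as `set i (w i)` on every state satisfying the invariant
lemma pv_fold_set {alpha : Type} (P : alpha -> Prop) (F : List alpha -> Nat -> List alpha)
    (w : Nat -> alpha) (N : Nat)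
    (hF : ∀ M i, M.length = N → (∀ x ∈ M, P x) → i < N → F M i = M.set i (w i))
    (hP : ∀ i, P (w i)) :
    ∀ (k a : Nat) (M : List alpha), a + k = N → M.length = N → (∀ x ∈ M, P x) →
      (List.range' a k).foldl F M = M.take a ++ (List.range' a k).map w := by
  intro k
  induction k with
  | zero =>
    intro a M hak hlen hPM
    simp [List.take_of_length_le (by omega : M.length ≤ a)]
  | succ k ihk =>
    intro a M hak hlen hPM
    rw [List.range'_succ, List.foldl_cons, List.map_cons]
    have ha : a < N := by omega
    rw [hF M a hlen hPM ha]
    have hlen' : (M.set a (w a)).length = N := by simp [hlen]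
    have hPM' : ∀ x ∈ M.set a (w a), P x := by
      intro x hx
      rcases List.mem_or_eq_of_mem_set hx with h | h
      · exact hPM x h
      · subst h; exact hP a
    rw [ihk (a + 1) (M.set a (w a)) (by omega) hlen' hPM']
    have htake : (M.set a (w a)).take (a + 1) = M.take a ++ [w a] := by
      apply List.ext_getElem
      · simp [hlen]; omega
      · intro i hi hi2
        simp only [List.length_take, List.length_set, hlen] at hi
        rw [List.getElem_take]
        by_cases hia : i = a
        · subst hia
          rw [List.getElem_set_self, List.getElem_append_right (by simp [hlen])]
          simp [hlen]
        · rw [List.getElem_set_ne (by omega)]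
          rw [List.getElem_append_left (by simp [hlen]; omega)]
          simp
    rw [htake, List.append_assoc, List.singleton_append]

-- collapse: an inner fold that each step rewrites entry i of M as a function of entry i
lemma pv_collapse {alpha beta : Type} (d : alpha) (i : Nat) (u : beta -> alpha -> alpha) :
    ∀ (L : List beta) (M : List alpha), i < M.length →
      L.foldl (fun M j => M.set i (u j (M.getD i d))) M
        = M.set i (L.foldl (fun r j => u j r) (M.getD i d)) := by
  intro L
  induction L with
  | nil =>
    intro M hi
    simp only [List.foldl_nil]
    rw [List.getD_eq_getElem _ _ hi, List.set_getElem_self]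
  | cons j L ihL =>
    intro M hi
    rw [List.foldl_cons, List.foldl_cons]
    rw [ihL _ (by simp [hi])]
    rw [List.set_set]
    congr 1
    rw [List.getD_eq_getElem _ _ (by simp [hi]), List.getElem_set_self]

-- characterization of port A as a double map
lemma pv_A_char (adj : List Int) :
    bitsets_to_matrix adj
      = (List.range adj.length).map (fun (i : Nat) => (List.range adj.length).map
          (fun (j : Nat) => if PySem.Int.band ((adj.getD i 0) >>> j) 1 ≠ 0 then (1 : Int) else 0)) := by
  unfold bitsets_to_matrix
  simp only [PySem.List.pyRange_zero_natCast, List.foldl_map, PySem.List.pyGetD_natCast,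
    Int.toNat_natCast]
  have hsetD : ∀ (M : List (List Int)) (i : Nat) (r : List Int),
      PySem.List.pySetD M (i : Int) r = M.set i r := by
    intro M i r; simp [pysem]
  have hsetD' : ∀ (r : List Int) (j : Nat) (v : Int),
      PySem.List.pySetD r (j : Int) v = r.set j v := by
    intro r j v; simp [pysem]
  simp only [hsetD, hsetD']
  rw [List.range_eq_range' (n := adj.length)]
  refine Eq.trans
    (pv_fold_set (fun r : List Int => r.length = adj.length) _
      (fun i => (List.range' 0 adj.length).map
        (fun (j : Nat) => if PySem.Int.band ((adj.getD i 0) >>> j) 1 ≠ 0 then (1 : Int) else 0))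
      adj.length ?_ (by intro i; simp)
      adj.length 0 (List.replicate adj.length (List.replicate adj.length (0 : Int)))
      (by omega) (by simp)
      (by intro x hx; rcases List.eq_of_mem_replicate hx with rfl; simp)) (by simp)
  intro M i hlen hrows hi
  rw [pv_collapse []
    i (fun (j : Nat) (r : List Int) => r.set j (if PySem.Int.band ((adj.getD i 0) >>> j) 1 ≠ 0 then (1 : Int) else 0))
    (List.range' 0 adj.length) M (by omega)]
  congr 1
  have hrlen : (M.getD i []).length = adj.length := by
    apply hrows
    rw [List.getD_eq_getElem _ _ (by omega)]
    exact List.getElem_mem _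
  refine Eq.trans
    (pv_fold_set (fun _ : Int => True) _
      (fun (j : Nat) => if PySem.Int.band ((adj.getD i 0) >>> j) 1 ≠ 0 then (1 : Int) else 0)
      adj.length (by intro r j _ _ _; rfl) (by intro _; trivial)
      adj.length 0 (M.getD i []) (by omega) hrlen (by intro _ _; trivial)) (by simp)

-- per-bitset bridge: A's tested row equals B's walked row
lemma pv_row_eq (n : Nat) (b : Int) :
    (List.range n).map (fun (j : Nat) => if PySem.Int.band (b >>> j) 1 ≠ 0 then (1 : Int) else 0)
      = pvRow n (((1 : Int) <<< n) - 1) b := by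
  rw [pv_mask_cast]
  cases b with
  | ofNat a =>
    have hmlt : a &&& (2 ^ n - 1) < 2 ^ n := by
      have h1 : (1 : Nat) ≤ 2 ^ n := Nat.one_le_two_pow
      have h2 := Nat.and_le_right (n := a) (m := 2 ^ n - 1)
      omega
    unfold pvRow
    rw [if_pos (show (0 : Int) ≤ Int.ofNat a from Int.natCast_nonneg a)]
    have hband : PySem.Int.band (Int.ofNat a) ((2 ^ n - 1 : Nat) : Int)
        = ((a &&& (2 ^ n - 1) : Nat) : Int) := by
      exact_mod_cast PySem.Int.band_natCast a (2 ^ n - 1)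
    rw [hband, Int.toNat_natCast]
    rw [pv_loop_char n _ 1 _ (by simp) hmlt]
    apply List.map_congr_left
    intro j hj
    have hjn : j < n := List.mem_range.mp hj
    have hshift : (Int.ofNat a) >>> j = ((a >>> j : Nat) : Int) := rfl
    rw [hshift]
    have hband1 : PySem.Int.band ((a >>> j : Nat) : Int) 1 = (((a >>> j) &&& 1 : Nat) : Int) := by
      exact_mod_cast PySem.Int.band_natCast (a >>> j) 1
    rw [hband1]
    have htb : (a &&& (2 ^ n - 1)).testBit j = a.testBit j := by
      rw [Nat.testBit_land, Nat.testBit_two_pow_sub_one]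
      simp [hjn]
    rw [htb]
    have htb2 : a.testBit j = ((a >>> j) &&& 1 != 0) := by
      show (1 &&& (a >>> j) != 0) = _
      rw [Nat.land_comm]
    rw [htb2]
    have hrep : (List.replicate n (0 : Int)).getD j 0 = 0 := by
      rw [List.getD_eq_getElem _ _ (by simp [hjn]), List.getElem_replicate]
    have hv : (a >>> j) &&& 1 = 0 ∨ (a >>> j) &&& 1 = 1 := by
      rw [Nat.and_one_is_mod]; omega
    rcases hv with hv | hv
    · rw [hv, hrep]; norm_num
    · rw [hv]; norm_num
  | negSucc c =>
    have hmlt : c &&& (2 ^ n - 1) < 2 ^ n := by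
      have h1 : (1 : Nat) ≤ 2 ^ n := Nat.one_le_two_pow
      have h2 := Nat.and_le_right (n := c) (m := 2 ^ n - 1)
      omega
    unfold pvRow
    rw [if_neg (not_le.mpr (Int.negSucc_lt_zero c))]
    have hnot : Int.not (Int.negSucc c) = (c : Int) := by
      simp [Int.not]
    rw [hnot]
    have hband : PySem.Int.band (c : Int) ((2 ^ n - 1 : Nat) : Int)
        = ((c &&& (2 ^ n - 1) : Nat) : Int) := PySem.Int.band_natCast _ _
    rw [hband, Int.toNat_natCast]
    rw [pv_loop_char n _ 0 _ (by simp) hmlt]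
    apply List.map_congr_left
    intro j hj
    have hjn : j < n := List.mem_range.mp hj
    have hshift : (Int.negSucc c) >>> j = Int.negSucc (c >>> j) := rfl
    rw [hshift]
    have hbandneg : PySem.Int.band (Int.negSucc (c >>> j)) 1
        = ((1 - (1 &&& (c >>> j)) : Nat) : Int) := by
      have hneg : ¬ (0 : Int) ≤ Int.negSucc (c >>> j) := not_le.mpr (Int.negSucc_lt_zero _)
      have harg : -(Int.negSucc (c >>> j)) - 1 = ((c >>> j : Nat) : Int) := by
        rw [Int.neg_negSucc]; push_cast; omega
      simp only [PySem.Int.band, if_neg hneg, if_pos (by norm_num : (0 : Int) ≤ 1), harg,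
        Int.toNat_natCast]
      norm_num
    rw [hbandneg]
    have htb : (c &&& (2 ^ n - 1)).testBit j = c.testBit j := by
      rw [Nat.testBit_land, Nat.testBit_two_pow_sub_one]
      simp [hjn]
    rw [htb]
    have htb2 : c.testBit j = ((c >>> j) &&& 1 != 0) := by
      show (1 &&& (c >>> j) != 0) = _
      rw [Nat.land_comm]
    rw [htb2]
    have hrep : (List.replicate n (1 : Int)).getD j 0 = 1 := by
      rw [List.getD_eq_getElem _ _ (by simp [hjn]), List.getElem_replicate]
    have hcomm : (1 : Nat) &&& (c >>> j) = (c >>> j) &&& 1 := Nat.land_comm _ _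
    rw [hcomm]
    have hv : (c >>> j) &&& 1 = 0 ∨ (c >>> j) &&& 1 = 1 := by
      rw [Nat.and_one_is_mod]; omega
    rcases hv with hv | hv
    · rw [hv, hrep]; norm_num
    · rw [hv]; norm_num

-- the final assembly
lemma pv_main (adj : List Int) : bitsets_to_matrix adj = bitsets_to_matrix_alt adj := by
  rw [pv_A_char]
  unfold bitsets_to_matrix_alt
  apply List.ext_getElem
  · simp
  · intro i hi hi2
    simp only [List.getElem_map, List.getElem_range] at hi ⊢
    rw [List.getD_eq_getElem _ _ (by simpa using hi)]
    rw [pv_row_eq]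

-- ===== VERDICT (by name: the statement is the Claim_ definition above) =====
theorem bitsets_to_matrix_spec : Claim_equal_bitsets_to_matrix := by
  intro adj _
  unfold Spec_bitsets_to_matrix
  exact pv_main adj
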